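-- pv_equiv track=rewrite | github.com/yehudav/Project-Euler | problem 11.py | matrix_cols_max_product
-- ===== SOURCE A (Python) =====
-- def max_product(line, adjacent_digits_num):
--     max_product_of_line = 0
--
--     while len(line) >= adjacent_digits_num:
--         current_product = 1
--
--         for i in range(adjacent_digits_num):
--             current_product *= int(line[i])
--
--         max_product_of_line = max(current_product, max_product_of_line)
--
--         line = line[1:]
--
--     return max_product_of_line
--
-- def matrix_cols_max_product(m, adjacent_digits_number):
--     cols_num = len(m[0])
--     max_cols_product = 0
--
--     for col in range(cols_num):
--         column = []
--         for row in m: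
--             column.append(row[col])
--
--         max_cols_product = max(max_cols_product, max_product(column, adjacent_digits_number))
--
--     return max_cols_product
-- ===== SOURCE B (Python) =====
-- def matrix_cols_max_product(m, adjacent_digits_number):
--     k = adjacent_digits_number
--     best = 0
--     for j in range(len(m[0])):
--         col = [row[j] for row in m]
--         prod, zeros = 1, 0
--         for i, x in enumerate(col):
--             if x == 0:
--                 zeros += 1
--             else:
--                 prod *= x
--             if i >= k:
--                 y = col[i - k]
--                 if y == 0:
--                     zeros -= 1
--                 else:
--                     prod //= y
--             if i >= k - 1:
--                 best = max(best, prod if zeros == 0 else 0)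
--     return best
-- ===== Notes on version B (the rewrite author's own statement) =====
-- stated objective: alternative
-- what changed: A recomputes each length-k window product from scratch while repeatedly slicing the column (line = line[1:]); B does one sliding-window pass per column, maintaining a running product of the nonzero window entries and a zero counter (exact integer division removes the outgoing element), with no list copies: O(cols*rows) arithmetic steps instead of O(cols*rows*k), though not measurably faster on the generated timing inputs.
import Mathlib
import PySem

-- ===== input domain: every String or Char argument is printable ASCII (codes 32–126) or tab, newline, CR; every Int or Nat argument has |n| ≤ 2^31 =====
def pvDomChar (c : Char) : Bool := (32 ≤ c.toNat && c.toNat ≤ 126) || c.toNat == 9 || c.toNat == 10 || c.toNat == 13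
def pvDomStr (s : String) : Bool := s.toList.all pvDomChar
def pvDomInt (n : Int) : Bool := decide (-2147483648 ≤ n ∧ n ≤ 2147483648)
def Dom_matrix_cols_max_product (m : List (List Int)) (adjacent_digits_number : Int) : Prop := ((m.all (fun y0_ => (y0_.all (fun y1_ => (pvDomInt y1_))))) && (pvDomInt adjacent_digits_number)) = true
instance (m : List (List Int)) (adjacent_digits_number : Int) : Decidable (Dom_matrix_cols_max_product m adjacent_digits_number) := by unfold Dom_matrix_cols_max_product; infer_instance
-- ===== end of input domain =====

-- B replaces A's per-window product recomputation over repeatedly sliced column copies by a single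
-- sliding-window pass per column (running product of nonzero entries + zero counter), no list copies.


-- ===== PORT A =====
-- current_product = 1; for i in range(adjacent_digits_num): current_product *= int(line[i])
-- (line[i] is in range whenever the while-guard len(line) >= k holds, so pyGetD's default is never read under Pre_)
def pvAWindowProd (line : List Int) (k : Int) : Int :=
  (PySem.List.pyRange 0 k 1).foldl (fun p i => p * PySem.List.pyGetD line i 0) 1

-- while len(line) >= k: … ; line = line[1:]   (for k ≤ 0 Python never exits this loop; such k are outside Pre_)
def pvALoop (k : Int) : List Int → Int → Int
  | [], acc => acc
  | x :: rest, acc =>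
      if k ≤ (((x :: rest).length : Nat) : Int) then
        pvALoop k rest (max (pvAWindowProd (x :: rest) k) acc)
      else acc

def matrix_cols_max_product (m : List (List Int)) (adjacent_digits_number : Int) : Int :=
  let cols_num := (PySem.List.pyGetD m 0 []).length
  (PySem.List.pyRange 0 (cols_num : Int) 1).foldl
    (fun acc col =>
      -- column = []; for row in m: column.append(row[col])   (row[col] in range under Pre_)
      let column := m.foldl (fun c row => c ++ [PySem.List.pyGetD row col 0]) []
      max acc (pvALoop adjacent_digits_number column 0)) 0

-- ===== PORT B =====
-- one enumerate step of Source B's inner loop: incoming element x at index i, outgoing col[i-k]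
def pvAltStep (col : List Int) (k : Int) (s : Int × Int × Int) (ix : Int × Int) : Int × Int × Int :=
  let prod := s.1
  let zeros := s.2.1
  let best := s.2.2
  let i := ix.1
  let x := ix.2
  let pz : Int × Int := if x = 0 then (prod, zeros + 1) else (prod * x, zeros)
  let pz2 : Int × Int :=
    if k ≤ i then
      let y := PySem.List.pyGetD col (i - k) 0
      if y = 0 then (pz.1, pz.2 - 1) else (PySem.Int.floordiv pz.1 y, pz.2)
    else pz
  let best2 := if k - 1 ≤ i then max best (if pz2.2 = 0 then pz2.1 else 0) else best
  (pz2.1, pz2.2, best2)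

def matrix_cols_max_product_alt (m : List (List Int)) (adjacent_digits_number : Int) : Int :=
  (PySem.List.pyRange 0 (((PySem.List.pyGetD m 0 []).length : Nat) : Int) 1).foldl
    (fun best j =>
      let col := m.map (fun row => PySem.List.pyGetD row j 0)
      ((PySem.List.enumerate col 0).foldl (pvAltStep col adjacent_digits_number) (1, 0, best)).2.2)
    0

-- ===== PRECONDITION & SPEC =====
-- Pre_ excludes exactly the inputs where Python A does not return: m = [] (IndexError on m[0]),
-- a row shorter than m[0] (IndexError on row[col]), and adjacent_digits_number ≤ 0 (the while loop never exits).
def Pre_matrix_cols_max_product (m : List (List Int)) (adjacent_digits_number : Int) : Prop :=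
  m ≠ [] ∧ 1 ≤ adjacent_digits_number ∧ ∀ row ∈ m, (m.headD []).length ≤ row.length
instance (m : List (List Int)) (adjacent_digits_number : Int) : Decidable (Pre_matrix_cols_max_product m adjacent_digits_number) := by unfold Pre_matrix_cols_max_product; infer_instance

def pvWitness_matrix_cols_max_product : List (List Int) × Int := ([[1, 2], [3, 4]], 2)

def Spec_matrix_cols_max_product (m : List (List Int)) (adjacent_digits_number : Int) (out : Int) : Prop := out = matrix_cols_max_product_alt m adjacent_digits_number
instance (m : List (List Int)) (adjacent_digits_number : Int) (out : Int) : Decidable (Spec_matrix_cols_max_product m adjacent_digits_number out) := by unfold Spec_matrix_cols_max_product; infer_instance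

-- ===== CLAIM (what is proved, stated in full; the proofs are below) =====
def Claim_equal_matrix_cols_max_product : Prop := ∀ (m : List (List Int)) (adjacent_digits_number : Int), Dom_matrix_cols_max_product m adjacent_digits_number → Pre_matrix_cols_max_product m adjacent_digits_number → Spec_matrix_cols_max_product m adjacent_digits_number (matrix_cols_max_product m adjacent_digits_number)

-- ===== LEMMAS AND PROOFS =====

def pvWins (kn : Nat) : List Int → List Int
  | [] => []
  | x :: r => if kn ≤ r.length + 1 then ((x :: r).take kn).prod :: pvWins kn r else []

theorem pvAWindowProd_eq (line : List Int) (k : Int) (hk : 0 ≤ k) (hlen : k.toNat ≤ line.length) :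
    pvAWindowProd line k = (line.take k.toNat).prod := by
  unfold pvAWindowProd
  rw [PySem.List.foldl_congr_mem _ _ (fun p i => p * PySem.List.pyGetD (line.take k.toNat) i 0) _ ?_]
  · set t := line.take k.toNat with ht
    have hk2 : k = ((t.length : Nat) : Int) := by
      rw [ht]; simp [List.length_take]; omega
    rw [hk2, PySem.List.foldl_pyRange_zero_pyGetD' t 0 (fun p v => p * v) 1]
    exact List.prod_eq_foldl.symm
  · intro p i hi
    rw [PySem.List.mem_pyRange_one] at hi
    congr 1
    have h1 : i = ((i.toNat : Nat) : Int) := by omega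
    rw [h1, PySem.List.pyGetD_natCast, PySem.List.pyGetD_natCast]
    have hlt : i.toNat < k.toNat := by omega
    rw [List.getD_eq_getElem?_getD, List.getD_eq_getElem?_getD, List.getElem?_take_of_lt hlt]

theorem pvALoop_eq (k : Int) (hk : 1 ≤ k) : ∀ (col : List Int) (acc : Int),
    pvALoop k col acc = (pvWins k.toNat col).foldl max acc := by
  intro col
  induction col with
  | nil => intro acc; simp [pvALoop, pvWins]
  | cons x r ih =>
    intro acc
    by_cases h : k.toNat ≤ r.length + 1
    · have hi : k ≤ (((x :: r).length : Nat) : Int) := by simp; omega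
      rw [pvALoop, if_pos hi, pvWins, if_pos h, List.foldl_cons, ih]
      congr 1
      rw [pvAWindowProd_eq _ _ (by omega) (by simp; omega)]
      omega
    · have hi : ¬ k ≤ (((x :: r).length : Nat) : Int) := by simp; omega
      rw [pvALoop, if_neg hi, pvWins, if_neg h]; simp

theorem pvWins_eq (kn : Nat) (hk : 1 ≤ kn) : ∀ col : List Int,
    pvWins kn col = (List.range (col.length + 1 - kn)).map (fun s => ((col.drop s).take kn).prod) := by
  intro col
  induction col with
  | nil => simp [pvWins]; omega
  | cons x r ih =>
    by_cases h : kn ≤ r.length + 1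
    · rw [pvWins, if_pos h]
      have hlen : (x :: r).length + 1 - kn = (r.length + 1 - kn) + 1 := by simp; omega
      rw [hlen, List.range_succ_eq_map, List.map_cons, List.map_map, ih]
      simp
    · rw [pvWins, if_neg h]
      have hlen : (x :: r).length + 1 - kn = 0 := by simp; omega
      rw [hlen]; simp

theorem pv_floordiv_mul_cancel (y q : Int) (hy : y ≠ 0) : PySem.Int.floordiv (y * q) y = q := by
  have h := PySem.Int.floordiv_mul_add_mod (y * q) y
  have hm : PySem.Int.mod (y * q) y = 0 := (PySem.Int.mod_eq_zero_iff_dvd _ _).mpr ⟨q, rfl⟩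
  have h2 : PySem.Int.floordiv (y * q) y * y = q * y := by rw [mul_comm q y]; omega
  exact mul_right_cancel₀ hy h2

theorem pv_winVal (w : List Int) :
    (if ((w.countP (fun v => decide (v = 0)) : Nat) : Int) = 0
     then (w.filter (fun v => decide (v ≠ 0))).prod else 0) = w.prod := by
  by_cases h0 : (0 : Int) ∈ w
  · have hc : 0 < w.countP (fun v => decide (v = 0)) := List.countP_pos_iff.mpr ⟨0, h0, by simp⟩
    rw [if_neg (by exact_mod_cast Nat.pos_iff_ne_zero.mp hc)]
    exact (List.prod_eq_zero h0).symm
  · have hc : w.countP (fun v => decide (v = 0)) = 0 := by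
      rw [List.countP_eq_zero]; intro v hv; simp; intro h; exact h0 (h ▸ hv)
    rw [if_pos (by exact_mod_cast hc)]
    congr 1
    apply List.filter_eq_self.mpr
    intro v hv; simp; intro h; exact h0 (h ▸ hv)

-- the one-step transition of B's sliding window
theorem pv_step (k : Int) (hk : 1 ≤ k) (pre rest : List Int) (x : Int) (best : Int) :
    pvAltStep (pre ++ x :: rest) k
      (((pre.drop (pre.length - k.toNat)).filter (fun v => decide (v ≠ 0))).prod,
       (((pre.drop (pre.length - k.toNat)).countP (fun v => decide (v = 0)) : Nat) : Int),
       best)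
      (((pre.length : Nat) : Int), x)
    = ((((pre ++ [x]).drop (pre.length + 1 - k.toNat)).filter (fun v => decide (v ≠ 0))).prod,
       ((((pre ++ [x]).drop (pre.length + 1 - k.toNat)).countP (fun v => decide (v = 0)) : Nat) : Int),
       if k.toNat ≤ pre.length + 1
       then max best ((pre ++ [x]).drop (pre.length + 1 - k.toNat)).prod
       else best) := by
  set kn := k.toNat with hknd
  have hkk : ((kn : Nat) : Int) = k := by omega
  set L := pre.length with hL
  by_cases hio : kn ≤ L
  · -- full window: an element leaves
    have hWlen : (pre.drop (L - kn)).length = kn := by simp [hL]; omega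
    obtain ⟨y, t, hyt⟩ : ∃ y t, pre.drop (L - kn) = y :: t := by
      cases hW : pre.drop (L - kn) with
      | nil => rw [hW] at hWlen; simp at hWlen; omega
      | cons a b => exact ⟨a, b, rfl⟩
    have hy_get : PySem.List.pyGetD (pre ++ x :: rest) (((L : Nat) : Int) - k) 0 = y := by
      have h1 : ((L : Nat) : Int) - k = (((L - kn : Nat) : Nat) : Int) := by omega
      rw [h1, PySem.List.pyGetD_natCast, List.getD_eq_getElem?_getD,
        List.getElem?_append_left (by omega), show L - kn = (L - kn) + 0 from rfl,
        ← List.getElem?_drop, hyt]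
      rfl
    have hWt : (pre ++ [x]).drop (L + 1 - kn) = t ++ [x] := by
      rw [List.drop_append_of_le_length (by omega)]
      have h3 : (pre.drop (L - kn)).tail = pre.drop (L - kn + 1) := List.tail_drop
      rw [hyt] at h3
      have h4 : L + 1 - kn = L - kn + 1 := by omega
      rw [h4, ← h3]; simp
    have hcond1 : k ≤ ((L : Nat) : Int) := by omega
    have hcond2 : k - 1 ≤ ((L : Nat) : Int) := by omega
    have hfull : kn ≤ L + 1 := by omega
    rw [hWt, hyt]
    simp only [pvAltStep, hy_get, if_pos hcond1, if_pos hcond2, if_pos hfull]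
    rw [← pv_winVal (t ++ [x])]
    by_cases hx : x = 0 <;> by_cases hy0 : y = 0 <;>
      simp [hx, hy0, List.filter_append, List.countP_append,
        List.prod_append, pv_floordiv_mul_cancel] <;>
      (try push_cast) <;>
      constructor <;> first
        | omega
        | rfl
        | simp [mul_assoc, pv_floordiv_mul_cancel _ _ hy0]
  · -- window still growing: nothing leaves
    have h0 : L - kn = 0 := by omega
    have h1 : L + 1 - kn = 0 := by omega
    have hcond1 : ¬ k ≤ ((L : Nat) : Int) := by omega
    rw [h0, h1, List.drop_zero, List.drop_zero]
    simp only [pvAltStep, if_neg hcond1]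
    by_cases hfull : kn ≤ L + 1
    · have hcond2 : k - 1 ≤ ((L : Nat) : Int) := by omega
      rw [if_pos hfull]
      rw [← pv_winVal (pre ++ [x])]
      simp only [if_pos hcond2]
      by_cases hx : x = 0 <;>
        simp [hx, List.filter_append, List.countP_append, List.prod_append]
    · have hcond2 : ¬ (k - 1 ≤ ((L : Nat) : Int)) := by omega
      rw [if_neg hfull]
      simp only [if_neg hcond2]
      by_cases hx : x = 0 <;>
        simp [hx, List.filter_append, List.countP_append, List.prod_append]

theorem pv_bInv (k : Int) (hk : 1 ≤ k) :
    ∀ (suf pre : List Int) (best : Int),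
    ((PySem.List.enumerate suf ((pre.length : Nat) : Int)).foldl (pvAltStep (pre ++ suf) k)
       (((pre.drop (pre.length - k.toNat)).filter (fun v => decide (v ≠ 0))).prod,
        (((pre.drop (pre.length - k.toNat)).countP (fun v => decide (v = 0)) : Nat) : Int),
        best)).2.2
      = ((pvWins k.toNat (pre ++ suf)).drop (pre.length + 1 - k.toNat)).foldl max best := by
  intro suf
  induction suf with
  | nil =>
    intro pre best
    rw [PySem.List.enumerate_nil, List.foldl_nil, List.append_nil]
    show best = _
    rw [pvWins_eq k.toNat (by omega) pre,
      List.drop_eq_nil_of_le (by rw [List.length_map, List.length_range]), List.foldl_nil]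
  | cons x rest ih =>
    intro pre best
    rw [PySem.List.enumerate_cons, List.foldl_cons, pv_step k hk pre rest x best]
    have IH := ih (pre ++ [x]) (if k.toNat ≤ pre.length + 1
        then max best ((pre ++ [x]).drop (pre.length + 1 - k.toNat)).prod else best)
    simp only [List.append_assoc, List.singleton_append, List.length_append,
      List.length_singleton, Nat.cast_add, Nat.cast_one] at IH
    rw [IH]
    by_cases hfull : k.toNat ≤ pre.length + 1
    · rw [if_pos hfull]
      rw [pvWins_eq k.toNat (by omega) (pre ++ x :: rest)]
      have hlen : (pre ++ x :: rest).length = pre.length + 1 + rest.length := by simp; omega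
      have hs : pre.length + 1 - k.toNat
          < ((List.range ((pre ++ x :: rest).length + 1 - k.toNat)).map
              (fun s => (((pre ++ x :: rest).drop s).take k.toNat).prod)).length := by
        rw [List.length_map, List.length_range, hlen]; omega
      rw [List.drop_eq_getElem_cons hs, List.foldl_cons, List.getElem_map, List.getElem_range]
      have hwin : (((pre ++ x :: rest).drop (pre.length + 1 - k.toNat)).take k.toNat)
          = (pre ++ [x]).drop (pre.length + 1 - k.toNat) := by
        have hc : pre ++ x :: rest = (pre ++ [x]) ++ rest := by simp
        rw [hc, List.drop_append_of_le_length (by simp only [List.length_append, List.length_singleton]; omega)]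
        exact List.take_left' (by simp only [List.length_drop, List.length_append, List.length_singleton]; omega)
      rw [hwin]
      have hsucc : pre.length + 1 - k.toNat + 1 = pre.length + 1 + 1 - k.toNat := by omega
      rw [hsucc]
    · rw [if_neg hfull]
      have h1 : pre.length + 1 - k.toNat = 0 := by omega
      have h2 : pre.length + 1 + 1 - k.toNat = 0 := by omega
      rw [h1, h2]

theorem pv_fold_max_shift (ws : List Int) : ∀ a : Int, 0 ≤ a →
    List.foldl max a ws = max a (List.foldl max 0 ws) := by
  induction ws with
  | nil => intro a ha; simp; omega
  | cons x t ih =>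
    intro a ha
    have h0 : 0 ≤ List.foldl max 0 t := (PySem.List.le_foldl_max t 0).1
    simp only [List.foldl_cons]
    rw [ih (max a x) (by omega), ih (max 0 x) (by omega)]
    omega

theorem pv_colEq (k : Int) (hk : 1 ≤ k) (col : List Int) (best0 : Int) (hb : 0 ≤ best0) :
    ((PySem.List.enumerate col 0).foldl (pvAltStep col k) (1, 0, best0)).2.2
      = max best0 (pvALoop k col 0) := by
  have h := pv_bInv k hk col [] best0
  simp only [List.nil_append, List.length_nil, Nat.cast_zero, List.drop_nil, List.filter_nil,
    List.prod_nil, List.countP_nil] at h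
  rw [show (0 : Nat) + 1 - k.toNat = 0 from by omega, List.drop_zero] at h
  rw [h, pvALoop_eq k hk col 0, pv_fold_max_shift _ best0 hb]

theorem pv_mainFold (k : Int) (hk : 1 ≤ k) (m : List (List Int)) :
    ∀ (js : List Int) (acc : Int), 0 ≤ acc →
    js.foldl (fun best j =>
        ((PySem.List.enumerate (m.map fun row => PySem.List.pyGetD row j 0) 0).foldl
          (pvAltStep (m.map fun row => PySem.List.pyGetD row j 0) k) (1, 0, best)).2.2) acc
      = js.foldl (fun acc j =>
          max acc (pvALoop k (m.map fun row => PySem.List.pyGetD row j 0) 0)) acc := by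
  intro js
  induction js with
  | nil => intro acc _; rfl
  | cons j t ih =>
    intro acc ha
    simp only [List.foldl_cons]
    rw [pv_colEq k hk _ acc ha, ih _ (le_trans ha (le_max_left _ _))]

-- ===== VERDICT (by name: the statement is the Claim_ definition above) =====
theorem matrix_cols_max_product_spec : Claim_equal_matrix_cols_max_product := by
  intro m adjacent_digits_number _ hpre
  obtain ⟨-, hk, -⟩ := hpre
  unfold Spec_matrix_cols_max_product matrix_cols_max_product matrix_cols_max_product_alt
  simp only [PySem.List.foldl_append_singleton_eq_map, List.nil_append]
  exact (pv_mainFold adjacent_digits_number hk m _ 0 le_rfl).symm
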